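-- pv_equiv track=rewrite | github.com/david-poirier-csn/aioaws | tests/test_aws_testsuite_2.py | _parse_txt_req
-- ===== SOURCE A (Python) =====
-- def _parse_txt_req(txt_req):
--     lines = txt_req.split('\n')
--     head = lines[0].split(' ')
--     method = head[0]
--     url = ' '.join(head[1:len(head)-1])
--     version = head[-1]
--
--     headers = {}
--     i = 1
--     while i < len(lines):
--         line = lines[i]
--         if line=='':
--             break
--         sep = line.find(':')
--         k = line[:sep].strip()
--         v = line[sep+1:].strip()
--
--         while i+1 < len(lines):
--             next_line = lines[i+1]
--             if next_line.startswith(' ') or next_line.startswith('\t'):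
--                 v += '\n' + next_line
--             else:
--                 break
--             i += 1
--
--         if k not in headers:
--             headers[k] = []
--         headers[k].append(v)
--         i += 1
--
--     body = ''
--     while i < len(lines):
--         if body != '':
--             body += '\r\n'
--         body += lines[i]
--         i += 1
--
--     return method, url, version, headers, body
-- ===== SOURCE B (Python) =====
-- def _parse_txt_req(txt_req):
--     lines = txt_req.split('\n')
--     head = lines[0].split(' ')
--     method = head[0]
--     url = ' '.join(head[1:-1])
--     version = head[-1]
--
--     # split the remaining lines at the first blank line: headers | body
--     tail = lines[1:]
--     if '' in tail:
--         cut = tail.index('')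
--         header_lines, body_lines = tail[:cut], tail[cut:]
--     else:
--         header_lines, body_lines = tail, []
--
--     # one pass over the header region, folding continuation lines into a pending entry
--     headers = {}
--     pending = None
--     for line in header_lines:
--         if pending is not None and (line.startswith(' ') or line.startswith('\t')):
--             pending = (pending[0], pending[1] + '\n' + line)
--         else:
--             if pending is not None:
--                 headers.setdefault(pending[0], []).append(pending[1])
--             sep = line.find(':')
--             pending = (line[:sep].strip(), line[sep+1:].strip())
--     if pending is not None:
--         headers.setdefault(pending[0], []).append(pending[1])
--
--     # drop the leading blank lines (separator included), then join
--     while body_lines and body_lines[0] == '':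
--         body_lines = body_lines[1:]
--     body = '\r\n'.join(body_lines)
--
--     return method, url, version, headers, body
-- ===== Notes on version B (the rewrite author's own statement) =====
-- stated objective: alternative
-- what changed: B replaces A's single index-driven while-loop cascade by a region decomposition: it first splits the lines at the first blank line into a header region and a body region, parses headers in one pass that folds continuation lines into a pending entry, and builds the body by dropping leading blank lines and joining the rest with the CRLF separator.
import Mathlib
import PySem

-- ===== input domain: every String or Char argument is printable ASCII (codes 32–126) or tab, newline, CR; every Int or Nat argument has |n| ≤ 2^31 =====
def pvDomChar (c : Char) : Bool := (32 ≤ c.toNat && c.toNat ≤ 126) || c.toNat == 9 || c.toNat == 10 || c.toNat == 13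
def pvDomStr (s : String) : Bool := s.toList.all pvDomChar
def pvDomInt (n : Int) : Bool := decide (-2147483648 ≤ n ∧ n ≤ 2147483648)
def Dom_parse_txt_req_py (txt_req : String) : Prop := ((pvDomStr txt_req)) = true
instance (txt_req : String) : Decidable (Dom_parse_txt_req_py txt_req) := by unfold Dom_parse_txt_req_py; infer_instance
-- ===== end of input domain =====

-- B re-parses the request with a different decomposition: it first splits the lines at the
-- first blank line into a header region and a body region, folds continuation lines into a
-- pending header entry in one pass, and joins the body region (leading blanks dropped);
-- objective: alternative (same cost, clearer region-based structure).

-- ===== PORT A =====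
-- inner `while i+1 < len(lines)` continuation-absorbing loop of A
def pvAbsorb : List String → String → String × List String
  | [], v => (v, [])
  | next :: rest, v =>
    if PySem.Str.startswith next " " || PySem.Str.startswith next "\t" then
      pvAbsorb rest (v ++ "\n" ++ next)
    else (v, next :: rest)

-- termination measure for pvHeaderA (the absorber only consumes lines)
theorem pvAbsorb_len : ∀ (l : List String) (v : String), (pvAbsorb l v).2.length ≤ l.length := by
  intro l
  induction l with
  | nil => intro v; simp [pvAbsorb]
  | cons x xs ih =>
    intro v
    simp only [pvAbsorb]
    split
    · exact Nat.le_trans (ih _) (Nat.le_succ _)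
    · simp

-- outer `while i < len(lines)` header loop of A, over the remaining lines
def pvHeaderA : List String → PySem.Dict String (List String) →
    PySem.Dict String (List String) × List String
  | [], h => (h, [])
  | line :: rest, h =>
    if line = "" then (h, line :: rest)
    else
      let sep := PySem.Str.find line ":"
      let k := PySem.Str.strip (PySem.Str.slice line none (some sep))
      let v := PySem.Str.strip (PySem.Str.slice line (some (sep + 1)) none)
      let r := pvAbsorb rest v
      pvHeaderA r.2 ((if h.contains k then h else h.insert k []).modify k [] (fun vs => vs ++ [r.1]))
termination_by l _ => l.length
decreasing_by exact Nat.lt_succ_of_le (pvAbsorb_len _ _)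

-- final `while i < len(lines)` body loop of A
def pvBodyA : List String → String → String
  | [], b => b
  | l :: rest, b => pvBodyA rest ((if b ≠ "" then b ++ "\r\n" else b) ++ l)

def parse_txt_req_py (txt_req : String) :
    String × String × String × (List (String × List String)) × String :=
  let lines := (PySem.Str.split? txt_req "\n").getD []   -- '\n' ≠ '' so split? is always some
  let head := (PySem.Str.split? (PySem.List.pyGetD lines 0 "") " ").getD []
  let method := PySem.List.pyGetD head 0 ""              -- head ≠ [] (split result), defaults unused
  let url := PySem.Str.join " " (PySem.List.slice head (some 1) (some (PySem.List.len head - 1)))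
  let version := PySem.List.pyGetD head (-1) ""
  let hr := pvHeaderA (PySem.List.slice lines (some 1) none) ⟨[]⟩
  let body := pvBodyA hr.2 ""
  (method, url, version, hr.1.items, body)

-- ===== PORT B =====
def pvParseHeaderLine (line : String) : String × String :=
  let sep := PySem.Str.find line ":"
  (PySem.Str.strip (PySem.Str.slice line none (some sep)),
   PySem.Str.strip (PySem.Str.slice line (some (sep + 1)) none))

-- headers.setdefault(k, []).append(v) for the pending entry (if any)
def pvFlush : Option (String × String) → PySem.Dict String (List String) →
    PySem.Dict String (List String)
  | none, h => h
  | some (k, v), h => (h.setdefault k []).modify k [] (fun vs => vs ++ [v])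

-- B's single pass over the header region, folding continuations into `pending`
def pvHeaderB : List String → PySem.Dict String (List String) → Option (String × String) →
    PySem.Dict String (List String)
  | [], h, p => pvFlush p h
  | line :: rest, h, p =>
    match p with
    | some (k, v) =>
      if PySem.Str.startswith line " " || PySem.Str.startswith line "\t" then
        pvHeaderB rest h (some (k, v ++ "\n" ++ line))
      else
        pvHeaderB rest (pvFlush (some (k, v)) h) (some (pvParseHeaderLine line))
    | none => pvHeaderB rest h (some (pvParseHeaderLine line))

def parse_txt_req_py_alt (txt_req : String) :
    String × String × String × (List (String × List String)) × String :=
  let lines := (PySem.Str.split? txt_req "\n").getD []   -- '\n' ≠ '' so split? is always some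
  let head := (PySem.Str.split? (PySem.List.pyGetD lines 0 "") " ").getD []
  let method := PySem.List.pyGetD head 0 ""              -- head ≠ [] (split result), defaults unused
  let url := PySem.Str.join " " (PySem.List.slice head (some 1) (some (-1)))
  let version := PySem.List.pyGetD head (-1) ""
  let tail := PySem.List.slice lines (some 1) none
  let hb := match PySem.List.index? tail "" with         -- split at the first blank line
    | some cut => (tail.take cut, tail.drop cut)
    | none => (tail, ([] : List String))
  let headers := pvHeaderB hb.1 ⟨[]⟩ none
  -- the `while body_lines and body_lines[0] == '':` loop is exactly dropWhile (== "")
  let body := PySem.Str.join "\r\n" (hb.2.dropWhile (fun l => l == ""))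
  (method, url, version, headers.items, body)

-- ===== PRECONDITION & SPEC =====
def Spec_parse_txt_req_py (txt_req : String) (out : String × String × String × (List (String × List String)) × String) : Prop := out = parse_txt_req_py_alt txt_req
instance (txt_req : String) (out : String × String × String × (List (String × List String)) × String) : Decidable (Spec_parse_txt_req_py txt_req out) := by unfold Spec_parse_txt_req_py; infer_instance

-- ===== CLAIM (what is proved, stated in full; the proofs are below) =====
def Claim_equal_parse_txt_req_py : Prop := ∀ (txt_req : String), Dom_parse_txt_req_py txt_req → Spec_parse_txt_req_py txt_req (parse_txt_req_py txt_req)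

-- ===== LEMMAS AND PROOFS =====

-- url: head[1:len(head)-1] and head[1:-1] are the same slice
theorem pv_slice_url (xs : List String) :
    PySem.List.slice xs (some 1) (some (PySem.List.len xs - 1)) =
      PySem.List.slice xs (some 1) (some (-1)) := by
  have hb : PySem.List.clampIdx xs.length ((xs.length : Int) - 1) =
      PySem.List.clampIdx xs.length (-1) := by
    unfold PySem.List.clampIdx
    split_ifs <;> omega
  simp only [PySem.List.slice, PySem.List.len, hb]

-- both appends into headers agree (setdefault vs explicit contains-check)
theorem pv_flush_eq (h : PySem.Dict String (List String)) (k v : String) :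
    pvFlush (some (k, v)) h =
      (if h.contains k then h else h.insert k []).modify k [] (fun vs => vs ++ [v]) := by
  by_cases hc : h.contains k = true
  · rw [pvFlush, PySem.Dict.setdefault_of_contains h _ hc, if_pos hc]
  · rw [pvFlush, PySem.Dict.setdefault_of_not_contains h _ (by simpa using hc),
      if_neg (by simpa using hc)]

-- a line starting with ' ' or '\t' is nonempty
theorem pv_cont_ne_empty (l : String)
    (hc : (PySem.Str.startswith l " " || PySem.Str.startswith l "\t") = true) : l ≠ "" := by
  rintro rfl
  simp [PySem.Str.startswith, PySem.Chars.startswith] at hc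

-- B's fold with a pending entry tracks A's continuation absorber
theorem pv_headerB_pending (rest : List String) : ∀ (v k : String)
    (h : PySem.Dict String (List String)),
    pvHeaderB (rest.takeWhile (fun l => !(l == ""))) h (some (k, v)) =
      pvHeaderB ((pvAbsorb rest v).2.takeWhile (fun l => !(l == "")))
        (pvFlush (some (k, (pvAbsorb rest v).1)) h) none ∧
    (pvAbsorb rest v).2.dropWhile (fun l => !(l == "")) =
      rest.dropWhile (fun l => !(l == "")) := by
  induction rest with
  | nil => intro v k h; simp [pvAbsorb, pvHeaderB, pvFlush]
  | cons next rest' ih =>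
    intro v k h
    by_cases hc : (PySem.Str.startswith next " " || PySem.Str.startswith next "\t") = true
    · have hne : next ≠ "" := pv_cont_ne_empty next hc
      have habs : pvAbsorb (next :: rest') v = pvAbsorb rest' (v ++ "\n" ++ next) := by
        simp only [pvAbsorb]; rw [if_pos hc]
      rw [habs]
      have htw : (next :: rest').takeWhile (fun l => !(l == "")) =
          next :: rest'.takeWhile (fun l => !(l == "")) := by
        simp [hne]
      have hdw : (next :: rest').dropWhile (fun l => !(l == "")) =
          rest'.dropWhile (fun l => !(l == "")) := by
        simp [hne]
      rw [htw, hdw]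
      have hstep : pvHeaderB (next :: rest'.takeWhile (fun l => !(l == ""))) h (some (k, v)) =
          pvHeaderB (rest'.takeWhile (fun l => !(l == ""))) h (some (k, v ++ "\n" ++ next)) := by
        simp only [pvHeaderB]; rw [if_pos hc]
      rw [hstep]
      exact ih (v ++ "\n" ++ next) k h
    · have habs : pvAbsorb (next :: rest') v = (v, next :: rest') := by
        simp only [pvAbsorb]; rw [if_neg hc]
      rw [habs]
      refine ⟨?_, rfl⟩
      by_cases hne : next = ""
      · subst hne
        simp [pvHeaderB, pvFlush]
      · have htw : (next :: rest').takeWhile (fun l => !(l == "")) =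
            next :: rest'.takeWhile (fun l => !(l == "")) := by
          simp [hne]
        rw [htw]
        simp only [pvHeaderB]
        rw [if_neg (by simpa using hc)]

-- A's header loop is B's region fold: headers from the blank-free prefix, rest from the blank on
theorem pv_header_main : ∀ (n : Nat) (L : List String), L.length ≤ n →
    ∀ (h : PySem.Dict String (List String)),
    pvHeaderA L h =
      (pvHeaderB (L.takeWhile (fun l => !(l == ""))) h none,
       L.dropWhile (fun l => !(l == ""))) := by
  intro n
  induction n with
  | zero =>
    intro L hL h
    have : L = [] := List.eq_nil_of_length_eq_zero (Nat.le_zero.mp hL)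
    subst this
    simp [pvHeaderA, pvHeaderB, pvFlush]
  | succ n ih =>
    intro L hL h
    match L with
    | [] => simp [pvHeaderA, pvHeaderB, pvFlush]
    | line :: rest =>
      by_cases hline : line = ""
      · subst hline
        simp [pvHeaderA, pvHeaderB, pvFlush]
      · rw [pvHeaderA]
        rw [if_neg hline]
        have hlen : (pvAbsorb rest
            (PySem.Str.strip (PySem.Str.slice line (some (PySem.Str.find line ":" + 1)) none))).2.length ≤ n := by
          have := pvAbsorb_len rest
            (PySem.Str.strip (PySem.Str.slice line (some (PySem.Str.find line ":" + 1)) none))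
          simp only [List.length_cons] at hL
          omega
        rw [ih _ hlen]
        have htw : (line :: rest).takeWhile (fun l => !(l == "")) =
            line :: rest.takeWhile (fun l => !(l == "")) := by
          simp [hline]
        have hdw : (line :: rest).dropWhile (fun l => !(l == "")) =
            rest.dropWhile (fun l => !(l == "")) := by
          simp [hline]
        rw [htw, hdw]
        have hstep : pvHeaderB (line :: rest.takeWhile (fun l => !(l == ""))) h none =
            pvHeaderB (rest.takeWhile (fun l => !(l == ""))) h (some (pvParseHeaderLine line)) := by
          simp [pvHeaderB]
        rw [hstep]
        obtain ⟨h1, h2⟩ := pv_headerB_pending rest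
          (PySem.Str.strip (PySem.Str.slice line (some (PySem.Str.find line ":" + 1)) none))
          (PySem.Str.strip (PySem.Str.slice line none (some (PySem.Str.find line ":"))))
          h
        rw [pvParseHeaderLine]
        rw [h1, h2, pv_flush_eq]

-- nonempty strings stay nonempty under append
theorem pv_append_ne (b s : String) (hb : b ≠ "") : b ++ s ≠ "" := by
  intro hcontra
  apply hb
  apply String.toList_inj.mp
  have := congrArg String.toList hcontra
  simp only [String.toList_append] at this
  simpa using List.eq_nil_of_append_eq_nil this |>.1

-- joining a list whose head already ends with the separator
theorem pv_join_absorb (sep x y : List Char) (r : List (List Char)) :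
    PySem.Chars.join sep ((x ++ sep ++ y) :: r) = PySem.Chars.join sep (x :: y :: r) := by
  cases r with
  | nil =>
    rw [PySem.Chars.join_singleton, PySem.Chars.join_cons_cons, PySem.Chars.join_singleton]
  | cons z r' =>
    rw [PySem.Chars.join_cons_cons, PySem.Chars.join_cons_cons, PySem.Chars.join_cons_cons]
    simp [List.append_assoc]

-- once the accumulator is nonempty, A's body loop is a join
theorem pv_bodyA_run : ∀ (L : List String) (b : String), b ≠ "" →
    pvBodyA L b = PySem.Str.join "\r\n" (b :: L) := by
  intro L
  induction L with
  | nil =>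
    intro b hb
    apply String.toList_inj.mp
    simp [pvBodyA, PySem.Str.toList_join, PySem.Chars.join_singleton]
  | cons l rest ih =>
    intro b hb
    have hstep : pvBodyA (l :: rest) b = pvBodyA rest (b ++ "\r\n" ++ l) := by
      simp [pvBodyA, hb]
    rw [hstep, ih _ (pv_append_ne _ _ (pv_append_ne _ _ hb))]
    apply String.toList_inj.mp
    simp only [PySem.Str.toList_join, List.map_cons, String.toList_append]
    exact pv_join_absorb _ _ _ _

-- A's body loop from the empty accumulator drops leading blanks, then joins
theorem pv_bodyA_zero : ∀ (L : List String),
    pvBodyA L "" = PySem.Str.join "\r\n" (L.dropWhile (fun l => l == "")) := by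
  intro L
  induction L with
  | nil =>
    apply String.toList_inj.mp
    simp [pvBodyA, PySem.Str.toList_join, PySem.Chars.join_nil]
  | cons l rest ih =>
    by_cases hl : l = ""
    · subst hl
      have hstep : pvBodyA ("" :: rest) "" = pvBodyA rest "" := by
        simp [pvBodyA]
      rw [hstep, ih]
      simp
    · have hstep : pvBodyA (l :: rest) "" = pvBodyA rest l := by
        simp [pvBodyA]
      rw [hstep, pv_bodyA_run rest l hl]
      simp [hl]

-- the blank-free prefix before the first blank line, as takeWhile/dropWhile
theorem pv_tw_decomp (pre : List String) (hpre : "" ∉ pre) (suf : List String) :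
    (pre ++ "" :: suf).takeWhile (fun l => !(l == "")) = pre := by
  induction pre with
  | nil => simp
  | cons x xs ih =>
    simp only [List.mem_cons, not_or] at hpre
    simp [Ne.symm hpre.1, ih hpre.2, beq_eq_false_iff_ne]

theorem pv_dw_decomp (pre : List String) (hpre : "" ∉ pre) (suf : List String) :
    (pre ++ "" :: suf).dropWhile (fun l => !(l == "")) = "" :: suf := by
  induction pre with
  | nil => simp
  | cons x xs ih =>
    simp only [List.mem_cons, not_or] at hpre
    simp [Ne.symm hpre.1, ih hpre.2]

-- the index?-based cut is the takeWhile/dropWhile split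
theorem pv_cut_some (tail : List String) (cut : Nat)
    (h : PySem.List.index? tail "" = some cut) :
    tail.take cut = tail.takeWhile (fun l => !(l == "")) ∧
    tail.drop cut = tail.dropWhile (fun l => !(l == "")) := by
  obtain ⟨pre, suf, rfl, rfl, hpre⟩ := (PySem.List.index?_eq_some_iff _ _ _).mp h
  rw [List.take_left, List.drop_left, pv_tw_decomp pre hpre suf, pv_dw_decomp pre hpre suf]
  exact ⟨rfl, rfl⟩

theorem pv_cut_none (tail : List String) (h : PySem.List.index? tail "" = none) :
    tail.takeWhile (fun l => !(l == "")) = tail ∧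
    tail.dropWhile (fun l => !(l == "")) = [] := by
  have hmem : "" ∉ tail := (PySem.List.index?_eq_none_iff _ _).mp h
  induction tail with
  | nil => simp
  | cons x xs ihp =>
    simp only [List.mem_cons, not_or] at hmem
    have hx : PySem.List.index? xs "" = none := (PySem.List.index?_eq_none_iff _ _).mpr hmem.2
    obtain ⟨h1, h2⟩ := ihp hx hmem.2
    constructor
    · simp [Ne.symm hmem.1, h1, beq_eq_false_iff_ne]
    · simp [Ne.symm hmem.1, h2]

-- ===== VERDICT (by name: the statement is the Claim_ definition above) =====
theorem parse_txt_req_py_spec : Claim_equal_parse_txt_req_py := by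
  intro txt_req _
  unfold Spec_parse_txt_req_py
  dsimp only [parse_txt_req_py, parse_txt_req_py_alt]
  rw [pv_slice_url]
  rw [pv_header_main (PySem.List.slice ((PySem.Str.split? txt_req "\n").getD []) (some 1) none).length
    _ (Nat.le_refl _) ⟨[]⟩]
  rw [pv_bodyA_zero]
  rcases hidx : PySem.List.index?
      (PySem.List.slice ((PySem.Str.split? txt_req "\n").getD []) (some 1) none) "" with _ | cut
  · obtain ⟨h1, h2⟩ := pv_cut_none _ hidx
    simp only [h1, h2]
  · obtain ⟨h1, h2⟩ := pv_cut_some _ cut hidx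
    simp only [h1, h2]
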